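-- pv_equiv track=rewrite | github.com/Shiraga12/PythonSnippets | are_characters_hidden.py | are_characters_hidden
-- ===== SOURCE A (Python) =====
-- def are_characters_hidden(word, combination):
--     current_position = 0
--
--     # Iterate through each character in the word
--     for char in word:
--         # Find the position of the current character in the combination string
--         position = combination.find(char, current_position)
--
--         # If the character is not found, return "No"
--         if position == -1:
--             return "No"
--
--         # Update the current position for the next iteration
--         current_position = position + 1
--
--     # If all characters are found, return "Yes"
--     return "Yes"
-- ===== SOURCE B (Python) =====
-- def _bisect_left(a, x):
--     # hand-written bisect_left (no imports allowed beyond those of the original)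
--     lo, hi = 0, len(a)
--     while lo < hi:
--         mid = (lo + hi) // 2
--         if a[mid] < x:
--             lo = mid + 1
--         else:
--             hi = mid
--     return lo
--
-- def are_characters_hidden(word, combination):
--     # Preprocess: an index table mapping each character of combination to the
--     # sorted list of its positions; then answer each character of word by a
--     # binary search for the first position >= pos (no rescanning of combination).
--     positions = {}
--     for i, ch in enumerate(combination):
--         positions.setdefault(ch, []).append(i)
--     pos = 0
--     for c in word:
--         idxs = positions.get(c)
--         if idxs is None:
--             return "No"
--         j = _bisect_left(idxs, pos)
--         if j == len(idxs):
--             return "No"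
--         pos = idxs[j] + 1
--     return "Yes"
-- ===== Notes on version B (the rewrite author's own statement) =====
-- stated objective: alternative
-- what changed: Replaces the greedy forward scan of combination (str.find from an advancing position) with a precomputed index table (char -> sorted list of positions) queried by binary search for each character of word, the classic 'Is Subsequence' follow-up algorithm.
import Mathlib
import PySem

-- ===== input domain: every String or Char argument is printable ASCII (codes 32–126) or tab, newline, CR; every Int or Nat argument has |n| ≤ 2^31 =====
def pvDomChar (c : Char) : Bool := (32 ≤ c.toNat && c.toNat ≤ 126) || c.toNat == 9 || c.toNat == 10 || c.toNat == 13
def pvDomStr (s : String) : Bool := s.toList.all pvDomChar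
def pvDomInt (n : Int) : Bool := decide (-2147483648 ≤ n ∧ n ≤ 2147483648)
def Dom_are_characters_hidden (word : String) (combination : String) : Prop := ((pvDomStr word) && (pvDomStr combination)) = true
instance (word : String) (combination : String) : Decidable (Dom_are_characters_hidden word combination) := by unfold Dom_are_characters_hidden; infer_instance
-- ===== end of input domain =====

-- B replaces A's greedy str.find scan with a precomputed index table (char -> sorted
-- positions) queried by binary search: a different algorithm, same results.

-- ===== PORT A =====
-- the for-loop of A: state = current_position (an Int, as Python's); early return "No"
def are_characters_hidden_loop (combination : String) : List Char → Int → String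
  | [], _ => "Yes"
  | char :: rest, current_position =>
    let position := PySem.Str.findFrom combination (String.singleton char) current_position none
    if position = -1 then "No"
    else are_characters_hidden_loop combination rest (position + 1)

def are_characters_hidden (word : String) (combination : String) : String :=
  are_characters_hidden_loop combination word.toList 0

-- ===== PORT B =====
-- the first loop of Source B: positions.setdefault(ch, []).append(i) — on PySem.Dict this is
-- exactly insert ch (getD ch [] ++ [i]) (overwrite keeps position, new keys append)
def pvBuild : PySem.Dict Char (List Int) → List (Int × Char) → PySem.Dict Char (List Int)
  | d, [] => d
  | d, (i, ch) :: rest => pvBuild (d.insert ch (d.getD ch [] ++ [i])) rest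

-- the second loop of Source B: state = pos; _bisect_left is the hand-written lo/hi/mid loop,
-- which is step for step PySem.List.bisectLeft; idxs[j] with 0 ≤ j < len(idxs)
def pvBLoop (positions : PySem.Dict Char (List Int)) : List Char → Int → String
  | [], _ => "Yes"
  | c :: rest, pos =>
    match positions.get? c with
    | none => "No"
    | some idxs =>
      let j := PySem.List.bisectLeft idxs pos
      if j = idxs.length then "No"
      else pvBLoop positions rest (PySem.List.pyGetD idxs (j : Int) 0 + 1)

def are_characters_hidden_alt (word : String) (combination : String) : String :=
  pvBLoop (pvBuild PySem.Dict.empty (PySem.List.enumerate combination.toList)) word.toList 0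

-- ===== PRECONDITION & SPEC =====
def Spec_are_characters_hidden (word : String) (combination : String) (out : String) : Prop := out = are_characters_hidden_alt word combination
instance (word : String) (combination : String) (out : String) : Decidable (Spec_are_characters_hidden word combination out) := by unfold Spec_are_characters_hidden; infer_instance

-- ===== CLAIM (what is proved, stated in full; the proofs are below) =====
def Claim_equal_are_characters_hidden : Prop := ∀ (word : String) (combination : String), Dom_are_characters_hidden word combination → Spec_are_characters_hidden word combination (are_characters_hidden word combination)

-- ===== LEMMAS AND PROOFS =====

-- reference predicate both loops are reduced to: greedy subsequence check on a suffix
def pvConsume : List Char → Char → Option (List Char)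
  | [], _ => none
  | x :: xs, c => if x = c then some xs else pvConsume xs c

def pvAllIn : List Char → List Char → Bool
  | [], _ => true
  | c :: rest, it =>
    match pvConsume it c with
    | none => false
    | some it' => pvAllIn rest it'

-- pvConsume finds nothing iff the character is absent
theorem pvConsume_eq_none_iff (m : List Char) (c : Char) :
    pvConsume m c = none ↔ c ∉ m := by
  induction m with
  | nil => simp [pvConsume]
  | cons x xs ih =>
    by_cases h : x = c
    · subst h; simp [pvConsume]
    · rw [show pvConsume (x :: xs) c = pvConsume xs c from by simp [pvConsume, h], ih]
      simp only [List.mem_cons, not_or]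
      exact ⟨fun hn => ⟨fun hcx => h hcx.symm, hn⟩, fun hn => hn.2⟩

-- if c ∈ m, pvConsume returns the suffix after the FIRST occurrence of c
theorem pvConsume_spec (m : List Char) (c : Char) (hc : c ∈ m) :
    ∃ j : Nat, m[j]? = some c ∧ (∀ i < j, m[i]? ≠ some c) ∧
      pvConsume m c = some (m.drop (j + 1)) := by
  induction m with
  | nil => simp at hc
  | cons x xs ih =>
    by_cases h : x = c
    · exact ⟨0, by simp [h], by omega, by simp [pvConsume, h]⟩
    · have hc' : c ∈ xs := by
        rcases List.mem_cons.mp hc with h1 | h1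
        · exact absurd h1.symm h
        · exact h1
      obtain ⟨j, hj, hmin, hcons⟩ := ih hc'
      refine ⟨j + 1, by simpa using hj, ?_, by simpa [pvConsume, h] using hcons⟩
      intro i hi
      cases i with
      | zero => simp [h]
      | succ i => simpa using hmin i (by omega)

-- the deterministic direction: the first occurrence determines pvConsume's output
theorem pvConsume_of_first (m : List Char) (c : Char) (t : Nat)
    (ht : m[t]? = some c) (hmin : ∀ i < t, m[i]? ≠ some c) :
    pvConsume m c = some (m.drop (t + 1)) := by
  have hc : c ∈ m := List.mem_of_getElem? ht
  obtain ⟨j, hj, hjmin, hcons⟩ := pvConsume_spec m c hc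
  have : j = t := by
    by_contra hne
    rcases Nat.lt_or_ge j t with hlt | hge
    · exact hmin j hlt hj
    · exact hjmin t (by omega) ht
  rw [hcons, this]

theorem prefix_singleton_drop (c : Char) (m : List Char) (j : Nat) :
    [c] <+: m.drop j ↔ m[j]? = some c := by
  rw [← List.head?_drop]
  cases m.drop j <;> simp [List.cons_prefix_cons, eq_comm]

-- Chars.find of a singleton pattern points where pvConsume consumes to
theorem find_singleton_consume (m : List Char) (c : Char) (hc : c ∈ m) :
    ∃ j : Nat, j < m.length ∧ PySem.Chars.find m [c] = (j : Int) ∧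
      pvConsume m c = some (m.drop (j + 1)) := by
  obtain ⟨j, hj, hmin, hcons⟩ := pvConsume_spec m c hc
  have hinf : [c] <:+: m := (List.singleton_infix_iff c m).mpr hc
  have hnn : 0 ≤ PySem.Chars.find m [c] := by
    rw [PySem.Chars.find_nonneg_iff]; exact hinf
  obtain ⟨hpre, hminf⟩ := PySem.Chars.find_spec hnn
  have ht : m[(PySem.Chars.find m [c]).toNat]? = some c :=
    (prefix_singleton_drop c m _).mp hpre
  have htj : (PySem.Chars.find m [c]).toNat = j := by
    by_contra hne
    rcases Nat.lt_or_ge (PySem.Chars.find m [c]).toNat j with hlt | hge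
    · exact hmin _ hlt ht
    · exact hminf j (by omega) ((prefix_singleton_drop c m j).mpr hj)
  have hjlen : j < m.length := by
    have := List.getElem?_eq_some_iff.mp hj
    exact this.choose
  exact ⟨j, hjlen, by omega, hcons⟩

-- A's loop computes the greedy subsequence check on the suffix from k
theorem main_loop (w : List Char) (comb : String) (k : Nat)
    (hk : k ≤ comb.toList.length) :
    are_characters_hidden_loop comb w (k : Int) =
      (if pvAllIn w (comb.toList.drop k) then "Yes" else "No") := by
  induction w generalizing k with
  | nil => simp [are_characters_hidden_loop, pvAllIn]
  | cons c rest ih =>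
    have hff : PySem.Str.findFrom comb (String.singleton c) (k : Int) none =
        PySem.Chars.findFrom comb.toList [c] (k : Int) none := by
      simp
    by_cases hc : c ∈ comb.toList.drop k
    · obtain ⟨j, hjlen, hfind, hcons⟩ := find_singleton_consume _ c hc
      have hpos : PySem.Chars.findFrom comb.toList [c] (k : Int) none = ((k + j : Nat) : Int) := by
        rw [PySem.Chars.findFrom_natCast _ _ k hk, hfind]
        split
        · omega
        · push_cast; ring
      have hstep : ((k + j : Nat) : Int) + 1 = ((k + j + 1 : Nat) : Int) := by push_cast; ring
      have hdrop : (comb.toList.drop k).drop (j + 1) = comb.toList.drop (k + j + 1) := by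
        rw [List.drop_drop]; ring_nf
      have hlen : j < (comb.toList.drop k).length := hjlen
      rw [List.length_drop] at hlen
      simp only [are_characters_hidden_loop, hff, hpos, hstep, pvAllIn, hcons, hdrop]
      rw [if_neg (by omega), ih (k + j + 1) (by omega)]
    · have hnone : PySem.Chars.find (comb.toList.drop k) [c] = -1 :=
        by rw [PySem.Chars.find_eq_neg_one_iff]
           exact fun h => hc ((List.singleton_infix_iff c _).mp h)
      have hpos : PySem.Chars.findFrom comb.toList [c] (k : Int) none = -1 := by
        rw [PySem.Chars.findFrom_natCast _ _ k hk, hnone]; simp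
      have hcn : pvConsume (comb.toList.drop k) c = none :=
        (pvConsume_eq_none_iff _ c).mpr hc
      simp [are_characters_hidden_loop, hpos, pvAllIn, hcn]

-- ---- B side: characterisation of the index table ----

-- the occurrence list of c in l
def pvOcc (l : List Char) (c : Char) : List Int :=
  ((PySem.List.enumerate l).filter (fun p => p.2 = c)).map (·.1)

theorem build_getD (ps : List (Int × Char)) (d : PySem.Dict Char (List Int)) (c : Char) :
    (pvBuild d ps).getD c [] = d.getD c [] ++ ((ps.filter (fun p => p.2 = c)).map (·.1)) := by
  induction ps generalizing d with
  | nil => simp [pvBuild]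
  | cons p rest ih =>
    obtain ⟨i, ch⟩ := p
    by_cases h : ch = c
    · subst h
      simp [pvBuild, ih]
    · simp [pvBuild, ih, PySem.Dict.getD_insert, h, Ne.symm h]

theorem build_get?_none (ps : List (Int × Char)) (d : PySem.Dict Char (List Int)) (c : Char) :
    (pvBuild d ps).get? c = none ↔ d.get? c = none ∧ ∀ p ∈ ps, p.2 ≠ c := by
  induction ps generalizing d with
  | nil => simp [pvBuild]
  | cons p rest ih =>
    obtain ⟨i, ch⟩ := p
    by_cases h : ch = c
    · subst h
      simp [pvBuild, ih]
    · simp [pvBuild, ih, PySem.Dict.get?_insert, Ne.symm h, h]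

theorem mem_pvOcc (l : List Char) (c : Char) (i : Int) :
    i ∈ pvOcc l c ↔ ∃ m : Nat, (m : Int) = i ∧ m < l.length ∧ l[m]? = some c := by
  unfold pvOcc
  simp only [List.mem_map, List.mem_filter, PySem.List.mem_enumerate_iff, decide_eq_true_eq]
  constructor
  · rintro ⟨⟨j, ch⟩, ⟨⟨k, hk, hp⟩, hc⟩, hi⟩
    obtain ⟨h1, h2⟩ := Prod.mk.injEq .. ▸ hp
    refine ⟨k, ?_, hk, ?_⟩
    · simp_all
    · rw [List.getElem?_eq_getElem hk]; simp_all
  · rintro ⟨m, hmi, hm, hc⟩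
    refine ⟨((m : Int), l[m]), ⟨⟨m, hm, by simp⟩, ?_⟩, by simpa using hmi⟩
    have := List.getElem?_eq_getElem hm
    rw [this] at hc
    simpa using Option.some.injEq .. ▸ hc

theorem pvOcc_pairwise (l : List Char) (c : Char) :
    (pvOcc l c).Pairwise (· < ·) := by
  unfold pvOcc
  exact ((PySem.List.pairwise_lt_enumerate l 0).filter _).map _ (fun _ _ h => h)

-- B's inner loop computes the same greedy subsequence check
theorem bloop_main (comb : List Char) (w : List Char) (k : Nat)
    (hk : k ≤ comb.length) :
    pvBLoop (pvBuild PySem.Dict.empty (PySem.List.enumerate comb)) w (k : Int) =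
      (if pvAllIn w (comb.drop k) then "Yes" else "No") := by
  induction w generalizing k with
  | nil => simp [pvBLoop, pvAllIn]
  | cons c rest ih =>
    set D := pvBuild PySem.Dict.empty (PySem.List.enumerate comb) with hD
    have hocc : D.getD c [] = pvOcc comb c := by
      rw [hD, build_getD]; simp [pvOcc]
    match hg : D.get? c with
    | none =>
      -- c occurs nowhere in comb
      have hnotin : c ∉ comb.drop k := by
        intro hmem
        have hmem' : c ∈ comb := List.mem_of_mem_drop hmem
        obtain ⟨m, hm, hcm⟩ := List.getElem_of_mem hmem'
        have := ((build_get?_none _ _ c).mp (hD ▸ hg)).2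
          ((m : Int), c) (by
            rw [PySem.List.mem_enumerate_iff]
            exact ⟨m, hm, by simp [hcm]⟩)
        simp at this
      have hcn : pvConsume (comb.drop k) c = none := (pvConsume_eq_none_iff _ c).mpr hnotin
      simp [pvBLoop, hg, pvAllIn, hcn]
    | some idxs =>
      have hidx : idxs = pvOcc comb c := by
        have : D.getD c [] = idxs := by simp [PySem.Dict.getD, hg]
        rw [← this, hocc]
      have hsorted : idxs.Pairwise (· ≤ ·) := by
        rw [hidx]; exact (pvOcc_pairwise comb c).imp (fun h => le_of_lt h)
      obtain ⟨hjle, hlt, hge⟩ := PySem.List.bisectLeft_spec idxs (k : Int) hsorted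
      set j := PySem.List.bisectLeft idxs (k : Int) with hj
      by_cases hjlen : j = idxs.length
      · -- every occurrence of c is before k: c ∉ drop k
        have hnotin : c ∉ comb.drop k := by
          intro hmem
          obtain ⟨t, hts, hcm⟩ := List.getElem_of_mem hmem
          have htlen : k + t < comb.length := by
            rw [List.length_drop] at hts; omega
          have hmemocc : ((k + t : Nat) : Int) ∈ idxs := by
            rw [hidx, mem_pvOcc]
            refine ⟨k + t, rfl, htlen, ?_⟩
            rw [List.getElem_drop] at hcm
            rw [List.getElem?_eq_getElem htlen, hcm]
          obtain ⟨i, hi, hiv⟩ := List.getElem_of_mem hmemocc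
          have := hlt i hi (by omega)
          rw [hiv] at this
          omega
        have hcn : pvConsume (comb.drop k) c = none := (pvConsume_eq_none_iff _ c).mpr hnotin
        simp [pvBLoop, hg, ← hj, hjlen, pvAllIn, hcn]
      · have hjlt : j < idxs.length := by omega
        -- e = idxs[j] is the first occurrence of c at index ≥ k
        obtain ⟨m, hmi, hm, hcm⟩ := (mem_pvOcc comb c idxs[j]).mp
          (by rw [← hidx]; exact List.getElem_mem hjlt)
        have hkm : k ≤ m := by
          have := hge j hjlt (le_refl j)
          omega
        -- minimality: no occurrence of c in comb at an index in [k, m)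
        have hmin : ∀ p : Nat, k ≤ p → p < m → comb[p]? ≠ some c := by
          intro p hkp hpm hpc
          have hpl : p < comb.length := by omega
          have hpm' : ((p : Nat) : Int) ∈ idxs := by
            rw [hidx, mem_pvOcc]; exact ⟨p, rfl, hpl, hpc⟩
          obtain ⟨i, hi, hiv⟩ := List.getElem_of_mem hpm'
          rcases Nat.lt_or_ge i j with hij | hij
          · have := hlt i hi hij
            rw [hiv] at this; omega
          · have hmono : idxs[j] ≤ idxs[i] := by
              rcases Nat.eq_or_lt_of_le hij with h | h
              · simp [h]
              · exact le_of_lt ((List.pairwise_iff_getElem.mp (hidx ▸ pvOcc_pairwise comb c)) j i hjlt hi h)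
            rw [hiv, ← hmi] at hmono
            omega
        -- drop-k view: first occurrence of c in comb.drop k is at m - k
        have hdropget : (comb.drop k)[m - k]? = some c := by
          rw [List.getElem?_drop]
          rw [show k + (m - k) = m from by omega]
          exact hcm
        have hdropmin : ∀ i < m - k, (comb.drop k)[i]? ≠ some c := by
          intro i hi
          rw [List.getElem?_drop]
          exact hmin (k + i) (by omega) (by omega)
        have hcons : pvConsume (comb.drop k) c = some (comb.drop (m + 1)) := by
          rw [pvConsume_of_first _ c (m - k) hdropget hdropmin, List.drop_drop,
              show k + (m - k + 1) = m + 1 from by omega]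
        have hgetD : PySem.List.pyGetD idxs ((j : Nat) : Int) 0 = (m : Int) := by
          rw [PySem.List.pyGetD_natCast]
          simp [List.getD, List.getElem?_eq_getElem hjlt, hmi]
        have hstep : (m : Int) + 1 = ((m + 1 : Nat) : Int) := by push_cast; ring
        simp only [pvBLoop, hg, ← hj, if_neg hjlen, hgetD, hstep, pvAllIn, hcons]
        exact ih (m + 1) (by omega)

-- ===== VERDICT (by name: the statement is the Claim_ definition above) =====
theorem are_characters_hidden_spec : Claim_equal_are_characters_hidden := by
  intro word combination _
  unfold Spec_are_characters_hidden are_characters_hidden are_characters_hidden_alt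
  have h1 := main_loop word.toList combination 0 (by omega)
  have h2 := bloop_main combination.toList word.toList 0 (by omega)
  simp only [Nat.cast_zero] at h1 h2
  rw [h1, h2]
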